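-- pv_equiv track=rewrite | github.com/young1lin/linux-contributors | linux_kernel_analyzer.py | get_subsystem_tier
-- ===== SOURCE A (Python) =====
-- SUBSYSTEM_TIERS = {
--     1: ["mm/", "kernel/sched/", "kernel/locking/", "net/core/", "init/", "lib/"],
--     2: ["kernel/bpf/", "kernel/trace/", "kernel/", "net/", "fs/", "block/",
--         "security/", "crypto/", "ipc/", "virt/kvm/"],
--     3: ["drivers/gpu/drm/", "drivers/net/", "drivers/scsi/", "drivers/nvme/",
--         "drivers/ata/", "drivers/usb/", "drivers/pci/", "drivers/input/",
--         "sound/", "arch/"],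
--     4: ["drivers/", "tools/", "samples/", "scripts/"],
--     5: ["Documentation/devicetree/", "MAINTAINERS", "CREDITS", ".mailmap"],
--     6: ["Documentation/"],
-- }
--
-- def get_subsystem_tier(files: list[str]) -> int:
--     """Determine subsystem tier (1-6) based on files touched. Lower tier = more critical."""
--     best_tier = 6  # default to least critical
--     for f in files:
--         f_lower = f.lower()
--         # Check VFS core files specifically (tier 1)
--         vfs_core = ["fs/namei.c", "fs/read_write.c", "fs/super.c", "fs/inode.c"]
--         if f in vfs_core:
--             return 1
--         # Check DT source files (tier 5)
--         if "/boot/dts/" in f and f.endswith((".dts", ".dtsi")):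
--             best_tier = min(best_tier, 5)
--             continue
--         for tier, prefixes in SUBSYSTEM_TIERS.items():
--             for prefix in prefixes:
--                 if f.startswith(prefix) or f_lower.startswith(prefix.lower()):
--                     best_tier = min(best_tier, tier)
--                     break
--     return best_tier
-- ===== SOURCE B (Python) =====
-- SUBSYSTEM_TIERS = {
--     1: ["mm/", "kernel/sched/", "kernel/locking/", "net/core/", "init/", "lib/"],
--     2: ["kernel/bpf/", "kernel/trace/", "kernel/", "net/", "fs/", "block/",
--         "security/", "crypto/", "ipc/", "virt/kvm/"],
--     3: ["drivers/gpu/drm/", "drivers/net/", "drivers/scsi/", "drivers/nvme/",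
--         "drivers/ata/", "drivers/usb/", "drivers/pci/", "drivers/input/",
--         "sound/", "arch/"],
--     4: ["drivers/", "tools/", "samples/", "scripts/"],
--     5: ["Documentation/devicetree/", "MAINTAINERS", "CREDITS", ".mailmap"],
--     6: ["Documentation/"],
-- }
--
-- VFS_CORE = ["fs/namei.c", "fs/read_write.c", "fs/super.c", "fs/inode.c"]
--
--
-- def _file_hits_tier(f: str, tier: int, prefixes: list[str]) -> bool:
--     """Does file f belong to this tier's rule set (VFS core -> tier 1 only,
--     device-tree sources -> tier 5 only, otherwise a prefix match)?"""
--     if f in VFS_CORE: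
--         return tier == 1
--     if "/boot/dts/" in f and f.endswith((".dts", ".dtsi")):
--         return tier == 5
--     f_lower = f.lower()
--     return any(f.startswith(p) or f_lower.startswith(p.lower()) for p in prefixes)
--
--
-- def get_subsystem_tier(files: list[str]) -> int:
--     """Determine subsystem tier (1-6) based on files touched. Lower tier = more critical."""
--     # Scan tiers in criticality order and return the first tier any file hits.
--     for tier, prefixes in SUBSYSTEM_TIERS.items():
--         if any(_file_hits_tier(f, tier, prefixes) for f in files):
--             return tier
--     return 6
-- ===== Notes on version B (the rewrite author's own statement) =====
-- stated objective: alternative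
-- what changed: Inverted the loop nesting: A scans files and maintains a best-tier minimum with an early return, while B scans tiers 1..6 in criticality order and returns the first tier that any touched file hits (falling back to 6), with no accumulator at all.
import Mathlib
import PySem

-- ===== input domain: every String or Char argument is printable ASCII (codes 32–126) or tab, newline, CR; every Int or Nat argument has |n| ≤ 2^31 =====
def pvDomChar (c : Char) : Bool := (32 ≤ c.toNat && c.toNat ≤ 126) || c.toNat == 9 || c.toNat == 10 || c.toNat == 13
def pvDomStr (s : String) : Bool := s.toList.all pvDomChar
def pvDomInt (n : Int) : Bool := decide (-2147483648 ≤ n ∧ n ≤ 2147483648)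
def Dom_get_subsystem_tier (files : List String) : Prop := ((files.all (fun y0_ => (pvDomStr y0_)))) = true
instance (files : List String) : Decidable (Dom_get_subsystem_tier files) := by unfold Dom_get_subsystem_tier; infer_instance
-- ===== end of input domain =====

-- B inverts the loop nesting: A scans files maintaining a best-tier minimum, B scans
-- tiers 1..6 in criticality order and returns the first tier any file hits (objective:
-- alternative traversal order, no accumulator).

-- shared module constants (SUBSYSTEM_TIERS and the vfs_core literal of both Pythons)
def pvTiers : List (Int × List String) :=
  [(1, ["mm/", "kernel/sched/", "kernel/locking/", "net/core/", "init/", "lib/"]),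
   (2, ["kernel/bpf/", "kernel/trace/", "kernel/", "net/", "fs/", "block/",
        "security/", "crypto/", "ipc/", "virt/kvm/"]),
   (3, ["drivers/gpu/drm/", "drivers/net/", "drivers/scsi/", "drivers/nvme/",
        "drivers/ata/", "drivers/usb/", "drivers/pci/", "drivers/input/",
        "sound/", "arch/"]),
   (4, ["drivers/", "tools/", "samples/", "scripts/"]),
   (5, ["Documentation/devicetree/", "MAINTAINERS", "CREDITS", ".mailmap"]),
   (6, ["Documentation/"])]

def pvVfsCore : List String := ["fs/namei.c", "fs/read_write.c", "fs/super.c", "fs/inode.c"]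

-- f.startswith(prefix) or f_lower.startswith(prefix.lower())
def pvMatch (f flo : String) (p : String) : Bool :=
  PySem.Str.startswith f p || PySem.Str.startswith flo (PySem.Str.lower p)

-- '/boot/dts/' in f and f.endswith(('.dts', '.dtsi'))
def pvIsDts (f : String) : Bool :=
  PySem.Str.isIn "/boot/dts/" f && (PySem.Str.endswith f ".dts" || PySem.Str.endswith f ".dtsi")

-- ===== PORT A =====
-- A's inner double loop over SUBSYSTEM_TIERS.items() (the break = first matching prefix of a tier)
def pvScanA (f flo : String) (best : Int) : Int :=
  pvTiers.foldl (fun acc tp => if tp.2.any (pvMatch f flo) then min acc tp.1 else acc) best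

-- A's outer for-loop over files, with the early `return 1` and the dts `continue`
def pvLoopA : List String → Int → Int
  | [], best => best
  | f :: rest, best =>
      let flo := PySem.Str.lower f
      if f ∈ pvVfsCore then 1
      else if pvIsDts f then pvLoopA rest (min best 5)
      else pvLoopA rest (pvScanA f flo best)

def get_subsystem_tier (files : List String) : Int := pvLoopA files 6

-- ===== PORT B =====
-- _file_hits_tier(f, tier, prefixes) of Source B
def pvHits (f : String) (tier : Int) (prefixes : List String) : Bool :=
  if f ∈ pvVfsCore then tier == 1
  else if pvIsDts f then tier == 5
  else
    let flo := PySem.Str.lower f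
    prefixes.any (pvMatch f flo)

-- Source B's for-loop over SUBSYSTEM_TIERS.items() with the early `return tier`
def pvSearchB (files : List String) : List (Int × List String) → Int
  | [] => 6
  | (tier, prefixes) :: rest =>
      if files.any (fun f => pvHits f tier prefixes) then tier
      else pvSearchB files rest

def get_subsystem_tier_alt (files : List String) : Int := pvSearchB files pvTiers

-- ===== PRECONDITION & SPEC =====
def Spec_get_subsystem_tier (files : List String) (out : Int) : Prop := out = get_subsystem_tier_alt files
instance (files : List String) (out : Int) : Decidable (Spec_get_subsystem_tier files out) := by unfold Spec_get_subsystem_tier; infer_instance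

-- ===== CLAIM (what is proved, stated in full; the proofs are below) =====
def Claim_equal_get_subsystem_tier : Prop := ∀ (files : List String), Dom_get_subsystem_tier files → Spec_get_subsystem_tier files (get_subsystem_tier files)

-- ===== LEMMAS AND PROOFS =====

-- proof-side characterisation: the tier a single file contributes
def tierOf (f : String) : Int :=
  if f ∈ pvVfsCore then 1
  else if pvIsDts f then 5
  else
    let flo := PySem.Str.lower f
    PySem.List.minD
      (pvTiers.filterMap (fun tp => if tp.2.any (pvMatch f flo) then some tp.1 else none))
      (fun t => t) 6

-- PySem.List.min? seeded with a head element computes the plain min-fold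
theorem pv_min_aux (xs : List Int) :
    ∀ (m : Int), PySem.List.min? (m :: xs) (fun t => t) = some (List.foldl min m xs) := by
  induction xs with
  | nil => intro m; rfl
  | cons x l ih =>
      intro m
      have h : PySem.List.min? (m :: x :: l) (fun t => t)
          = PySem.List.min? (min m x :: l) (fun t => t) := by
        unfold PySem.List.min?
        simp only [List.foldl_cons]
        congr 1
        rcases lt_or_ge x m with hxm | hxm
        · rw [if_pos hxm, min_eq_right hxm.le]
        · rw [if_neg (not_lt.2 hxm), min_eq_left hxm]
      rw [h, ih, List.foldl_cons]

theorem pv_minD_cons (m : Int) (xs : List Int) :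
    PySem.List.minD (m :: xs) (fun t => t) 6 = List.foldl min m xs := by
  unfold PySem.List.minD
  rw [pv_min_aux]
  rfl

theorem pv_M1 (xs : List Int) : ∀ (a b : Int),
    List.foldl min (min a b) xs = min a (List.foldl min b xs) := by
  induction xs with
  | nil => intro a b; rfl
  | cons x l ih => intro a b; simp only [List.foldl]; rw [min_assoc, ih]

-- fold of min with seed v ≤ 6 equals min of the seed and min(xs, default=6)
theorem pv_G (v : Int) (xs : List Int) (hv : v ≤ 6) :
    List.foldl min v xs = min v (PySem.List.minD xs (fun t => t) 6) := by
  cases xs with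
  | nil =>
      simp [PySem.List.minD, PySem.List.min?]
      omega
  | cons x l =>
      rw [pv_minD_cons]
      simpa using pv_M1 l v x

theorem pv_foldl_min_le (xs : List Int) : ∀ (b : Int), List.foldl min b xs ≤ b := by
  induction xs with
  | nil => intro b; simp
  | cons x l ih =>
      intro b
      simp only [List.foldl]
      exact le_trans (ih (min b x)) (min_le_left _ _)

theorem pv_foldl_min_ge (c : Int) (xs : List Int) :
    ∀ (b : Int), c ≤ b → (∀ y ∈ xs, c ≤ y) → c ≤ List.foldl min b xs := by
  induction xs with
  | nil => intro b hb _; simpa using hb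
  | cons x l ih =>
      intro b hb h
      simp only [List.foldl]
      exact ih (min b x) (le_min hb (h x (by simp))) (fun y hy => h y (by simp [hy]))

theorem pv_foldl_min_le_mem (xs : List Int) :
    ∀ (b y : Int), y ∈ xs → List.foldl min b xs ≤ y := by
  induction xs with
  | nil => intro b y hy; simp at hy
  | cons x l ih =>
      intro b y hy
      rcases List.mem_cons.1 hy with rfl | hy
      · simp only [List.foldl]
        exact le_trans (pv_foldl_min_le l _) (min_le_right _ _)
      · simp only [List.foldl]
        exact ih _ y hy

theorem pv_foldl_min_mem (xs : List Int) :
    ∀ (b : Int), List.foldl min b xs = b ∨ List.foldl min b xs ∈ xs := by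
  induction xs with
  | nil => intro b; left; rfl
  | cons x l ih =>
      intro b
      rcases ih (min b x) with h | h
      · rcases min_choice b x with hc | hc
        · left; simp only [List.foldl]; rw [h, hc]
        · right; simp only [List.foldl]; rw [h, hc]; simp
      · right; simp only [List.foldl]; exact List.mem_cons_of_mem _ h

theorem pv_minD_bounds (xs : List Int) (h : ∀ y ∈ xs, 1 ≤ y ∧ y ≤ 6) :
    1 ≤ PySem.List.minD xs (fun t => t) 6 ∧ PySem.List.minD xs (fun t => t) 6 ≤ 6 := by
  cases xs with
  | nil => simp [PySem.List.minD, PySem.List.min?]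
  | cons x l =>
      rw [pv_minD_cons]
      have hx := h x (by simp)
      constructor
      · exact pv_foldl_min_ge 1 l x hx.1 (fun y hy => (h y (by simp [hy])).1)
      · exact le_trans (pv_foldl_min_le l x) hx.2

theorem pv_minD_le_mem (xs : List Int) (y : Int) (hy : y ∈ xs) :
    PySem.List.minD xs (fun t => t) 6 ≤ y := by
  cases xs with
  | nil => simp at hy
  | cons x l =>
      rw [pv_minD_cons]
      rcases List.mem_cons.1 hy with rfl | hy
      · exact pv_foldl_min_le l y
      · exact pv_foldl_min_le_mem l x y hy

-- if every element is ≥ t and t occurs, the min with default 6 is t  (t ≤ 6)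
theorem pv_minD_eq (xs : List Int) (t : Int) (hall : ∀ y ∈ xs, t ≤ y) (hmem : t ∈ xs) :
    PySem.List.minD xs (fun t => t) 6 = t := by
  have h1 := pv_minD_le_mem xs t hmem
  cases xs with
  | nil => simp at hmem
  | cons x l =>
      rw [pv_minD_cons] at h1 ⊢
      have h2 : t ≤ List.foldl min x l :=
        pv_foldl_min_ge t l x (hall x (by simp)) (fun y hy => hall y (by simp [hy]))
      omega

theorem pv_tiers_fst : ∀ tp ∈ pvTiers, 1 ≤ tp.1 ∧ tp.1 ≤ 6 := by decide

theorem pv_matched_mem (f flo : String) :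
    ∀ t ∈ pvTiers.filterMap (fun tp => if tp.2.any (pvMatch f flo) then some tp.1 else none),
      1 ≤ t ∧ t ≤ 6 := by
  intro t ht
  rcases List.mem_filterMap.1 ht with ⟨tp, htp, hpick⟩
  by_cases hc : tp.2.any (pvMatch f flo) = true
  · simp [hc] at hpick; subst hpick; exact pv_tiers_fst tp htp
  · simp [hc] at hpick

theorem pv_tierOf_bounds (f : String) : 1 ≤ tierOf f ∧ tierOf f ≤ 6 := by
  unfold tierOf
  split_ifs with h1 h2
  · omega
  · omega
  · exact pv_minD_bounds _ (pv_matched_mem f (PySem.Str.lower f))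

-- === A's side: the loop computes the min over tierOf (from the previous development) ===

theorem pv_scan_filterMap (f flo : String) (l : List (Int × List String)) :
    ∀ (b : Int),
      l.foldl (fun acc tp => if tp.2.any (pvMatch f flo) then min acc tp.1 else acc) b
        = (l.filterMap (fun tp => if tp.2.any (pvMatch f flo) then some tp.1 else none)).foldl min b := by
  induction l with
  | nil => intro b; rfl
  | cons tp l ih =>
      intro b
      by_cases hc : tp.2.any (pvMatch f flo) = true
      · simp only [List.foldl_cons, List.filterMap_cons, hc, if_pos]
        exact ih (min b tp.1)
      · simp only [List.foldl_cons, List.filterMap_cons, hc, Bool.false_eq_true,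
          if_false]
        exact ih b

theorem pv_master (files : List String) :
    ∀ (b : Int), 1 ≤ b → b ≤ 6 →
      pvLoopA files b = min b (PySem.List.minD (files.map tierOf) (fun t => t) 6) := by
  induction files with
  | nil =>
      intro b _ hb6
      simp [pvLoopA, PySem.List.minD, PySem.List.min?]
      omega
  | cons f rest ih =>
      intro b hb1 hb6
      have hmrest := pv_minD_bounds (rest.map tierOf)
        (by intro y hy; rcases List.mem_map.1 hy with ⟨g, _, rfl⟩; exact pv_tierOf_bounds g)
      have htof := pv_tierOf_bounds f
      have hRHS : PySem.List.minD ((f :: rest).map tierOf) (fun t => t) 6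
          = min (tierOf f) (PySem.List.minD (rest.map tierOf) (fun t => t) 6) := by
        rw [List.map_cons, pv_minD_cons]
        exact pv_G (tierOf f) (rest.map tierOf) htof.2
      by_cases hv : f ∈ pvVfsCore
      · have hL : pvLoopA (f :: rest) b = 1 := by
          simp only [pvLoopA]; rw [if_pos hv]
        have ht : tierOf f = 1 := by
          simp only [tierOf]; rw [if_pos hv]
        rw [hL, hRHS, ht]
        omega
      · by_cases hd : pvIsDts f = true
        · have hL : pvLoopA (f :: rest) b = pvLoopA rest (min b 5) := by
            simp only [pvLoopA]; rw [if_neg hv, if_pos hd]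
          have ht : tierOf f = 5 := by
            simp only [tierOf]; rw [if_neg hv, if_pos hd]
          rw [hL, ih (min b 5) (by omega) (by omega), hRHS, ht]
          omega
        · set matched := pvTiers.filterMap
            (fun tp => if tp.2.any (pvMatch f (PySem.Str.lower f)) then some tp.1 else none) with hm
          have ht : tierOf f = PySem.List.minD matched (fun t => t) 6 := by
            simp only [tierOf]; rw [if_neg hv, if_neg hd]
          have htb := pv_minD_bounds matched (by rw [hm]; exact pv_matched_mem f (PySem.Str.lower f))
          have hscan : pvScanA f (PySem.Str.lower f) b = min b (PySem.List.minD matched (fun t => t) 6) := by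
            rw [pvScanA, pv_scan_filterMap, ← hm]
            exact pv_G b matched hb6
          have hL : pvLoopA (f :: rest) b = pvLoopA rest (pvScanA f (PySem.Str.lower f) b) := by
            simp only [pvLoopA]; rw [if_neg hv, if_neg hd]
          rw [hL, hscan, ih _ (by omega) (by omega), hRHS, ht]
          omega

-- === B's side: the tier-major search also computes the min over tierOf ===

-- a hit at tier t bounds the file's tier from above
theorem pv_hitA (t : Int) (ps : List String) (hmem : (t, ps) ∈ pvTiers) :
    ∀ f, pvHits f t ps = true → tierOf f ≤ t := by
  intro f h
  unfold pvHits at h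
  unfold tierOf
  by_cases hv : f ∈ pvVfsCore
  · rw [if_pos hv] at h ⊢
    have : t = 1 := by simpa using h
    omega
  · rw [if_neg hv] at h ⊢
    by_cases hd : pvIsDts f = true
    · rw [if_pos hd] at h ⊢
      have : t = 5 := by simpa using h
      omega
    · rw [if_neg hd] at h ⊢
      apply pv_minD_le_mem
      exact List.mem_filterMap.2 ⟨(t, ps), hmem, by simp [h]⟩

-- a file whose tier is t ≤ 5 hits the (unique) rule set of tier t
theorem pv_hitB (t : Int) (ps : List String)
    (huniq : ∀ tp ∈ pvTiers, tp.1 = t → tp.2 = ps) :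
    ∀ f, tierOf f = t → t ≤ 5 → pvHits f t ps = true := by
  intro f h ht5
  unfold tierOf at h
  unfold pvHits
  by_cases hv : f ∈ pvVfsCore
  · rw [if_pos hv] at h ⊢; simp [← h]
  · rw [if_neg hv] at h ⊢
    by_cases hd : pvIsDts f = true
    · rw [if_pos hd] at h ⊢; simp [← h]
    · rw [if_neg hd] at h ⊢
      simp only at h
      set flo := PySem.Str.lower f with hflo
      set matched := pvTiers.filterMap
        (fun tp => if tp.2.any (pvMatch f flo) then some tp.1 else none) with hm
      have hmemt : t ∈ matched := by
        rcases hmx : matched with _ | ⟨x, l⟩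
        · rw [hmx] at h
          simp [PySem.List.minD, PySem.List.min?] at h
          omega
        · rw [hmx] at h
          rw [pv_minD_cons] at h
          rw [← h]
          exact pv_foldl_min_mem l x |>.elim (fun he => by rw [he]; simp) (fun he => by simp [he])
      rcases List.mem_filterMap.1 hmemt with ⟨tp, htp, hpick⟩
      by_cases hc : tp.2.any (pvMatch f flo) = true
      · have h1 : tp.1 = t := by simpa [hc] using hpick
        have h2 := huniq tp htp h1
        rw [← h2]
        exact hc
      · simp [hc] at hpick

-- one step of B's tier-major search
theorem pv_step (t : Int) (ps : List String) (L : List (Int × List String))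
    (ht5 : t ≤ 5)
    (hmem : (t, ps) ∈ pvTiers)
    (huniq : ∀ tp ∈ pvTiers, tp.1 = t → tp.2 = ps)
    (hrec : ∀ files : List String, (∀ f ∈ files, t + 1 ≤ tierOf f) →
      pvSearchB files L = PySem.List.minD (files.map tierOf) (fun x => x) 6) :
    ∀ files : List String, (∀ f ∈ files, t ≤ tierOf f) →
      pvSearchB files ((t, ps) :: L) = PySem.List.minD (files.map tierOf) (fun x => x) 6 := by
  intro files hall
  simp only [pvSearchB]
  by_cases hany : files.any (fun f => pvHits f t ps) = true
  · rw [if_pos hany]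
    rcases List.any_eq_true.1 hany with ⟨f, hf, hhit⟩
    have hle := pv_hitA t ps hmem f hhit
    have hge := hall f hf
    have heq : tierOf f = t := le_antisymm hle hge
    symm
    apply pv_minD_eq
    · intro y hy
      rcases List.mem_map.1 hy with ⟨g, hg, rfl⟩
      exact hall g hg
    · exact List.mem_map.2 ⟨f, hf, heq⟩
  · rw [if_neg hany]
    apply hrec
    intro f hf
    have h1 := hall f hf
    by_cases he : tierOf f = t
    · exact absurd (List.any_eq_true.2 ⟨f, hf, pv_hitB t ps huniq f he ht5⟩) hany
    · omega

-- base: tier 6 — either branch returns 6, and all remaining tiers are 6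
theorem pv_base (ps : List String) :
    ∀ files : List String, (∀ f ∈ files, 6 ≤ tierOf f) →
      pvSearchB files [(6, ps)] = PySem.List.minD (files.map tierOf) (fun x => x) 6 := by
  intro files hall
  have hb := pv_minD_bounds (files.map tierOf)
    (by intro y hy; rcases List.mem_map.1 hy with ⟨g, _, rfl⟩; exact pv_tierOf_bounds g)
  have hge : 6 ≤ PySem.List.minD (files.map tierOf) (fun x => x) 6 := by
    cases hx : files.map tierOf with
    | nil => simp [PySem.List.minD, PySem.List.min?]
    | cons x l =>
        rw [pv_minD_cons]
        apply pv_foldl_min_ge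
        · have : x ∈ files.map tierOf := by rw [hx]; simp
          rcases List.mem_map.1 this with ⟨g, hg, rfl⟩
          exact hall g hg
        · intro y hy
          have : y ∈ files.map tierOf := by rw [hx]; simp [hy]
          rcases List.mem_map.1 this with ⟨g, hg, rfl⟩
          exact hall g hg
  have h6 : PySem.List.minD (files.map tierOf) (fun x => x) 6 = 6 := by omega
  simp only [pvSearchB]
  by_cases hany : files.any (fun f => pvHits f 6 ps) = true
  · rw [if_pos hany, h6]
  · rw [if_neg hany]
    exact h6.symm ▸ rfl

theorem pv_searchB_eq (files : List String) :
    pvSearchB files pvTiers = PySem.List.minD (files.map tierOf) (fun x => x) 6 := by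
  have s6 := pv_base ["Documentation/"]
  have s5 := pv_step 5 ["Documentation/devicetree/", "MAINTAINERS", "CREDITS", ".mailmap"] _
    (by norm_num) (by decide) (by decide)
    (fun fs h => s6 fs (fun f hf => by have := h f hf; omega))
  have s4 := pv_step 4 ["drivers/", "tools/", "samples/", "scripts/"] _
    (by norm_num) (by decide) (by decide) s5
  have s3 := pv_step 3 ["drivers/gpu/drm/", "drivers/net/", "drivers/scsi/", "drivers/nvme/",
        "drivers/ata/", "drivers/usb/", "drivers/pci/", "drivers/input/",
        "sound/", "arch/"] _
    (by norm_num) (by decide) (by decide) s4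
  have s2 := pv_step 2 ["kernel/bpf/", "kernel/trace/", "kernel/", "net/", "fs/", "block/",
        "security/", "crypto/", "ipc/", "virt/kvm/"] _
    (by norm_num) (by decide) (by decide) s3
  have s1 := pv_step 1 ["mm/", "kernel/sched/", "kernel/locking/", "net/core/", "init/", "lib/"] _
    (by norm_num) (by decide) (by decide) s2
  exact s1 files (fun f _ => (pv_tierOf_bounds f).1)

-- ===== VERDICT (by name: the statement is the Claim_ definition above) =====
theorem get_subsystem_tier_spec : Claim_equal_get_subsystem_tier := by
  intro files _
  unfold Spec_get_subsystem_tier get_subsystem_tier get_subsystem_tier_alt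
  have hA := pv_master files 6 (by omega) (by omega)
  have hB := pv_searchB_eq files
  have hb := pv_minD_bounds (files.map tierOf)
    (by intro y hy; rcases List.mem_map.1 hy with ⟨g, _, rfl⟩; exact pv_tierOf_bounds g)
  rw [hA, hB]
  omega
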